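-- pv_equiv track=rewrite | github.com/luke-a-thompson/QuickSig | quicksig/hopf_algebras/rooted_trees.py | _render_tree_unicode
-- ===== SOURCE A (Python) =====
-- def _build_children(parent: list[int]) -> list[list[int]]:
--     """Compute adjacency lists (children) from a parent array.
--
--     Args:
--         parent: A single-tree parent array in preorder, length ``n``.
--
--     Returns:
--         A list of length ``n`` where entry ``i`` contains the child indices of ``i``.
--
--     Complexity:
--         O(n) time and O(n) additional space.
--     """
--     n = len(parent)
--     children: list[list[int]] = [[] for _ in range(n)]
--     for i in range(1, n):
--         p = parent[i]
--         if p >= 0: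
--             children[p].append(i)
--     return children
--
-- def _render_tree_unicode(parent: list[int], show_ids: bool) -> list[str]:
--     """Render a single rooted tree to Unicode lines.
--
--     Args:
--         parent: Parent array for one tree (preorder indexing, root at 0).
--         show_ids: If ``True``, append node indices to bullets (e.g., ``•5``).
--
--     Returns:
--         A list of strings, each a line of the rendered tree using box-drawing
--         characters.
--     """
--     # Rooted at node 0; draw using box-drawing characters
--     children = _build_children(parent)
--
--     def node_label(i: int) -> str:
--         return f"•{i}" if show_ids else "•"
--
--     lines: list[str] = []
--
--     def dfs(node: int, prefix: str, is_last: bool) -> None: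
--         if node == 0:
--             lines.append(node_label(node))
--         else:
--             branch = "└─ " if is_last else "├─ "
--             lines.append(prefix + branch + node_label(node))
--         # Root's immediate children should not be indented; deeper levels follow the usual rules.
--         if node == 0:
--             next_prefix = ""
--         else:
--             next_prefix = prefix + ("   " if is_last else "│  ")
--         for idx, child in enumerate(children[node]):
--             dfs(child, next_prefix, idx == len(children[node]) - 1)
--
--     dfs(0, "", True)
--     return lines
-- ===== SOURCE B (Python) =====
-- def _build_children(parent):
--     n = len(parent)
--     children = [[] for _ in range(n)]
--     for i in range(1, n):
--         p = parent[i]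
--         if p >= 0:
--             children[p].append(i)
--     return children
--
--
-- def _render_tree_unicode(parent, show_ids):
--     # Bottom-up rendering: each subtree is rendered as a self-contained block of
--     # lines (relative to its parent), and prefixes are added when a child block
--     # is spliced into its parent, instead of threading a prefix down the recursion.
--     children = _build_children(parent)
--
--     def label(i):
--         return f"\u2022{i}" if show_ids else "\u2022"
--
--     def block(node, is_last):
--         head = ("\u2514\u2500 " if is_last else "\u251c\u2500 ") + label(node)
--         ext = "   " if is_last else "\u2502  "
--         out = [head]
--         kids = children[node]
--         for idx, c in enumerate(kids):
--             out.extend(ext + line for line in block(c, idx == len(kids) - 1))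
--         return out
--
--     lines = [label(0)]
--     kids0 = children[0]
--     for idx, c in enumerate(kids0):
--         lines.extend(block(c, idx == len(kids0) - 1))
--     return lines
-- ===== Notes on version B (the rewrite author's own statement) =====
-- stated objective: alternative
-- what changed: A threads a growing prefix string down a recursive dfs that appends to a shared lines list; B renders each subtree bottom-up as a self-contained block of lines and prepends the connector/indent prefixes only when splicing a child block into its parent, with the root handled outside the recursion.
import Mathlib
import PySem

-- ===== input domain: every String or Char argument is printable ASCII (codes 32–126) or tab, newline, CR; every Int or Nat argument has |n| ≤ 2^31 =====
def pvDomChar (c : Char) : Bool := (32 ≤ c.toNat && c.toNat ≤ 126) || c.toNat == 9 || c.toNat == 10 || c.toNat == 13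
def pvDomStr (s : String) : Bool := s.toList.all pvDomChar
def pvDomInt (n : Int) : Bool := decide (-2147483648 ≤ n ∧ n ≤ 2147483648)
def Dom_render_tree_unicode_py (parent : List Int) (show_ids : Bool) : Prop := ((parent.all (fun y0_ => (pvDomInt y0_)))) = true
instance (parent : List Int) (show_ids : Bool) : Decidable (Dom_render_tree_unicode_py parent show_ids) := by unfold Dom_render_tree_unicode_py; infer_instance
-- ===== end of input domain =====

-- B renders each subtree bottom-up as a self-contained block of lines and adds the
-- prefixes when splicing a child block into its parent, instead of A's top-down
-- prefix-threading recursive dfs; equal return values are proved on Pre_.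

-- ===== PORT A =====
-- _build_children, shared verbatim by Source A and Source B
def pvBuildChildren (parent : List Int) : List (List Int) :=
  (PySem.List.pyRange 1 parent.length 1).foldl
    (fun children i =>
      let p := PySem.List.pyGetD parent i 0
      if 0 ≤ p then
        -- children[p].append(i); Python raises IndexError when p ≥ len(children) (excluded by Pre_)
        children.set p.toNat (children.getD p.toNat [] ++ [i])
      else children)
    (List.replicate parent.length [])

-- the recursive dfs of A; fuel parent.length + 1 bounds Python's recursion depth
-- (each root-to-node path visits pairwise-distinct nodes)
def pvDfsA (children : List (List Int)) (show_ids : Bool) :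
    Nat → Int → String → Bool → List String
  | 0, _, _, _ => []
  | fuel+1, node, pfx, is_last =>
    let label := if show_ids then "•" ++ PySem.Int.toStr node else "•"
    let line := if node = 0 then label
                else pfx ++ (if is_last then "└─ " else "├─ ") ++ label
    let next_prefix := if node = 0 then "" else pfx ++ (if is_last then "   " else "│  ")
    -- children[node]: raises in Python iff node out of range, which happens only for parent = [] (excluded by Pre_)
    let cs := (PySem.List.pyGet? children node).getD []
    line :: ((PySem.List.enumerate cs 0).map
      (fun ic => pvDfsA children show_ids fuel ic.2 next_prefix (ic.1 == (cs.length : Int) - 1))).flatten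

def render_tree_unicode_py (parent : List Int) (show_ids : Bool) : List String :=
  let children := pvBuildChildren parent
  pvDfsA children show_ids (parent.length + 1) 0 "" true

-- ===== PORT B =====
-- block(node, is_last) of Source B: the subtree's lines relative to node's parent;
-- the child blocks are indented (ext ++ line) as they are spliced in.
-- fuel parent.length bounds the recursion depth of the non-root nodes.
def pvBlock (children : List (List Int)) (show_ids : Bool) :
    Nat → Int → Bool → List String
  | 0, _, _ => []
  | fuel+1, node, is_last =>
    let head := (if is_last then "└─ " else "├─ ") ++
                (if show_ids then "•" ++ PySem.Int.toStr node else "•")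
    let ext := if is_last then "   " else "│  "
    let kids := (PySem.List.pyGet? children node).getD []
    head :: ((PySem.List.enumerate kids 0).map
      (fun ic => (pvBlock children show_ids fuel ic.2 (ic.1 == (kids.length : Int) - 1)).map
        (fun line => ext ++ line))).flatten

def render_tree_unicode_py_alt (parent : List Int) (show_ids : Bool) : List String :=
  let children := pvBuildChildren parent
  let kids0 := (PySem.List.pyGet? children 0).getD []
  (if show_ids then "•" ++ PySem.Int.toStr 0 else "•")
    :: ((PySem.List.enumerate kids0 0).map
        (fun ic => pvBlock children show_ids parent.length ic.2
          (ic.1 == (kids0.length : Int) - 1))).flatten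

-- ===== PRECONDITION & SPEC =====
-- Pre_ = exactly the inputs where Python A returns: a nonempty parent array (A indexes children[0])
-- whose nonnegative entries parent[1..] are in range (else children[p].append raises IndexError)
def Pre_render_tree_unicode_py (parent : List Int) (show_ids : Bool) : Prop :=
  parent ≠ [] ∧ ∀ i : Nat, 1 ≤ i → i < parent.length →
    0 ≤ parent.getD i 0 → parent.getD i 0 < (parent.length : Int)

instance (parent : List Int) (show_ids : Bool) : Decidable (Pre_render_tree_unicode_py parent show_ids) := by
  unfold Pre_render_tree_unicode_py; infer_instance

def pvWitness_render_tree_unicode_py : List Int × Bool := ([-1, 0, 0, 1], true)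

def Spec_render_tree_unicode_py (parent : List Int) (show_ids : Bool) (out : List String) : Prop := out = render_tree_unicode_py_alt parent show_ids
instance (parent : List Int) (show_ids : Bool) (out : List String) : Decidable (Spec_render_tree_unicode_py parent show_ids out) := by unfold Spec_render_tree_unicode_py; infer_instance

-- ===== CLAIM (what is proved, stated in full; the proofs are below) =====
def Claim_equal_render_tree_unicode_py : Prop := ∀ (parent : List Int) (show_ids : Bool), Dom_render_tree_unicode_py parent show_ids → Pre_render_tree_unicode_py parent show_ids → Spec_render_tree_unicode_py parent show_ids (render_tree_unicode_py parent show_ids)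

-- ===== LEMMAS AND PROOFS =====

-- every index stored in the children lists is ≥ 1 (the build loop runs over range(1, n))
theorem pvBuildPos_aux (parent : List Int) :
    ∀ (ks : List Int) (acc : List (List Int)),
      (∀ i ∈ ks, 1 ≤ i) →
      (∀ l ∈ acc, ∀ c ∈ l, 1 ≤ c) →
      ∀ l ∈ ks.foldl
        (fun children i =>
          let p := PySem.List.pyGetD parent i 0
          if 0 ≤ p then children.set p.toNat (children.getD p.toNat [] ++ [i])
          else children) acc,
      ∀ c ∈ l, 1 ≤ c := by
  intro ks
  induction ks with
  | nil => intro acc _ hacc l hl; exact hacc l hl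
  | cons i t ih =>
    intro acc hks hacc l hl
    refine ih _ (fun j hj => hks j (List.mem_cons_of_mem _ hj)) ?_ l hl
    intro l' hl' c hc
    simp only at hl'
    set p := PySem.List.pyGetD parent i 0 with hp
    by_cases h0 : 0 ≤ p
    · rw [if_pos h0] at hl'
      rcases List.mem_or_eq_of_mem_set hl' with hmem | rfl
      · exact hacc l' hmem c hc
      · rcases List.mem_append.mp hc with hmem | hci
        · cases hg : acc[p.toNat]? with
          | none =>
            rw [List.getD_eq_getElem?_getD, hg] at hmem
            simp at hmem
          | some x =>
            rw [List.getD_eq_getElem?_getD, hg] at hmem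
            exact hacc x (List.mem_of_getElem? hg) c hmem
        · have : c = i := by simpa using hci
          subst this
          exact hks c (List.mem_cons_self ..)
    · rw [if_neg h0] at hl'
      exact hacc l' hl' c hc

theorem pvBuild_pos (parent : List Int) :
    ∀ l ∈ pvBuildChildren parent, ∀ c ∈ l, 1 ≤ c := by
  unfold pvBuildChildren
  refine pvBuildPos_aux parent _ _ ?_ ?_
  · intro i hi
    exact (PySem.List.mem_pyRange_one.mp hi).1
  · intro l hl
    have : l = [] := List.eq_of_mem_replicate hl
    subst this
    intro c hc
    simp at hc

-- the key bridge: for a non-root node, A's prefix-threaded dfs is B's relative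
-- block with the prefix prepended to every line (same fuel on both sides)
theorem pvDfs_eq_block (children : List (List Int)) (show_ids : Bool)
    (hpos : ∀ l ∈ children, ∀ c ∈ l, 1 ≤ c) :
    ∀ (f : Nat) (node : Int) (pfx : String) (lst : Bool), node ≠ 0 →
      pvDfsA children show_ids f node pfx lst
        = (pvBlock children show_ids f node lst).map (fun s => pfx ++ s) := by
  intro f
  induction f with
  | zero => intro node pfx lst _; simp [pvDfsA, pvBlock]
  | succ f ih =>
    intro node pfx lst hnode
    simp only [pvDfsA, pvBlock, if_neg hnode, List.map_cons]
    congr 1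
    · rw [String.append_assoc]
    · rw [List.map_flatten, List.map_map]
      congr 1
      apply List.map_congr_left
      intro ic hic
      have hne : ic.2 ≠ 0 := by
        cases hg : PySem.List.pyGet? children node with
        | none =>
          rw [hg] at hic
          simp at hic
        | some l =>
          have hmem : ic.2 ∈ l := by
            rw [hg] at hic
            rw [PySem.List.mem_enumerate_iff] at hic
            obtain ⟨k, hk, rfl⟩ := hic
            exact List.getElem_mem hk
          have := hpos l (PySem.List.mem_of_pyGet?_eq_some _ hg) ic.2 hmem
          omega
      rw [ih ic.2 _ _ hne]
      simp only [Function.comp_apply, List.map_map]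
      apply List.map_congr_left
      intro s _
      simp [String.append_assoc]

-- ===== VERDICT (by name: the statement is the Claim_ definition above) =====
theorem render_tree_unicode_py_spec : Claim_equal_render_tree_unicode_py := by
  intro parent show_ids _hdom _hpre
  unfold Spec_render_tree_unicode_py render_tree_unicode_py render_tree_unicode_py_alt
  have hpos := pvBuild_pos parent
  simp only [pvDfsA, if_true]
  congr 1
  congr 1
  apply List.map_congr_left
  intro ic hic
  have hne : ic.2 ≠ 0 := by
    cases hg : PySem.List.pyGet? (pvBuildChildren parent) 0 with
    | none =>
      rw [hg] at hic
      simp at hic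
    | some l =>
      have hmem : ic.2 ∈ l := by
        rw [hg] at hic
        rw [PySem.List.mem_enumerate_iff] at hic
        obtain ⟨k, hk, rfl⟩ := hic
        exact List.getElem_mem hk
      have := hpos l (PySem.List.mem_of_pyGet?_eq_some _ hg) ic.2 hmem
      omega
  rw [pvDfs_eq_block (pvBuildChildren parent) show_ids hpos parent.length ic.2 "" _ hne]
  simp
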